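-- pv_equiv track=rewrite | github.com/giljuand/partial-rejection | star_strings.py | create_star_string_bad_event_dict
-- ===== SOURCE A (Python) =====
-- def create_star_string_bad_event_dict(n, w):
--     """w is a string (with stars) represented as a list."""
--     result = {}
--     for i in range(n-len(w)+1):
--         var_values = {}
--         for j in range(len(w)):
--             if w[j] != '*':
--                 var_values[i+j] = int(w[j])
--         result[i]=var_values
--     return result
-- ===== SOURCE B (Python) =====
-- def create_star_string_bad_event_dict(n, w):
--     """w is a string (with stars) represented as a list."""
--     m = n - len(w) + 1
--     if m <= 0:
--         return {}
--     # transposed loops: scan w ONCE on the outside; each non-star cell is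
--     # broadcast into every window's bucket; windows never rescan w.
--     buckets = [[] for _ in range(m)]
--     for j, s in enumerate(w):
--         if s != '*':
--             v = int(s)
--             buckets = [b + [(i + j, v)] for i, b in enumerate(buckets)]
--     return {i: dict(b) for i, b in enumerate(buckets)}
-- ===== Notes on version B (the rewrite author's own statement) =====
-- stated objective: alternative
-- what changed: The loop nesting is transposed: A scans all of w once per window; B scans w once on the outside and, at each non-star cell, appends that cell's (position, value) entry to every window's bucket, assembling the per-window dicts from the buckets at the end.
import Mathlib
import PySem

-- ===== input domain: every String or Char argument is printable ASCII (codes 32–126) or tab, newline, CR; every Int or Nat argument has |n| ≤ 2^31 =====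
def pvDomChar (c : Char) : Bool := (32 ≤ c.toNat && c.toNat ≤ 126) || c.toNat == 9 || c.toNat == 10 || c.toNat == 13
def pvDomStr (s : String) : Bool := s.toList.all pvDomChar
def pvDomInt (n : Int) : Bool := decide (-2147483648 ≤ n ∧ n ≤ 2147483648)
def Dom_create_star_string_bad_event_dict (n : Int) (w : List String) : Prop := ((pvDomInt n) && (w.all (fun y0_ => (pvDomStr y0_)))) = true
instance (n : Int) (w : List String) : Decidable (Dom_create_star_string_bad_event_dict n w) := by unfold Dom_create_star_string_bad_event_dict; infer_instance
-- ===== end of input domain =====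

-- B transposes the loop nesting: one outer scan of w; each non-star cell is appended to every
-- window's bucket, and the per-window dicts are assembled from the buckets at the end.


-- ===== PORT A =====
-- literal transliteration of A: for each i in range(n-len(w)+1) rescan all of w,
-- inserting i+j ↦ int(w[j]) for every non-star cell (under Pre_ the parse never fails;
-- the .getD 0 default is unreachable there)
def create_star_string_bad_event_dict (n : Int) (w : List String) : List (Int × List (Int × Int)) :=
  ((PySem.List.pyRange 0 (n - (w.length : Int) + 1) 1).foldl
    (fun (result : PySem.Dict Int (List (Int × Int))) i =>
      let var_values : PySem.Dict Int Int :=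
        (PySem.List.pyRange 0 ((w.length : Int)) 1).foldl
          (fun vv j =>
            let s := PySem.List.pyGetD w j ""
            if s ≠ "*" then vv.insert (i + j) ((PySem.Int.ofStr? s).getD 0) else vv)
          PySem.Dict.empty
      result.insert i var_values.items)
    PySem.Dict.empty).items

-- ===== PORT B =====
-- transliteration of Source B: early return on empty range; buckets = [[] for _ in range(m)];
-- one outer fold over enumerate(w) rebuilding the bucket list at each non-star cell;
-- finally {i: dict(b) for i, b in enumerate(buckets)}
def create_star_string_bad_event_dict_alt (n : Int) (w : List String) : List (Int × List (Int × Int)) :=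
  let m := n - (w.length : Int) + 1
  if m ≤ 0 then []
  else
    let buckets0 : List (List (Int × Int)) := (PySem.List.pyRange 0 m 1).map (fun _ => [])
    let buckets :=
      (PySem.List.enumerate w).foldl
        (fun bks p =>
          if p.2 ≠ "*" then
            let v := (PySem.Int.ofStr? p.2).getD 0
            (PySem.List.enumerate bks).map (fun q => q.2 ++ [(q.1 + p.1, v)])
          else bks)
        buckets0
    (PySem.List.enumerate buckets).map
      (fun q => (q.1, (q.2.foldl (fun (d : PySem.Dict Int Int) kv => d.insert kv.1 kv.2) PySem.Dict.empty).items))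

-- ===== PRECONDITION & SPEC =====
-- Pre_ excludes exactly the inputs where Python A raises ValueError: the window range is
-- nonempty and some non-star entry of w is not parseable by int().
def Pre_create_star_string_bad_event_dict (n : Int) (w : List String) : Prop :=
  n - (w.length : Int) + 1 ≤ 0 ∨ ∀ s ∈ w, s ≠ "*" → (PySem.Int.ofStr? s).isSome = true
instance (n : Int) (w : List String) : Decidable (Pre_create_star_string_bad_event_dict n w) := by
  unfold Pre_create_star_string_bad_event_dict; infer_instance
def pvWitness_create_star_string_bad_event_dict : Int × List String := (4, ["1", "*", "-2"])

def Spec_create_star_string_bad_event_dict (n : Int) (w : List String) (out : List (Int × List (Int × Int))) : Prop := out = create_star_string_bad_event_dict_alt n w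
instance (n : Int) (w : List String) (out : List (Int × List (Int × Int))) : Decidable (Spec_create_star_string_bad_event_dict n w out) := by unfold Spec_create_star_string_bad_event_dict; infer_instance

-- ===== CLAIM (what is proved, stated in full; the proofs are below) =====
def Claim_equal_create_star_string_bad_event_dict : Prop := ∀ (n : Int) (w : List String), Dom_create_star_string_bad_event_dict n w → Pre_create_star_string_bad_event_dict n w → Spec_create_star_string_bad_event_dict n w (create_star_string_bad_event_dict n w)

-- ===== LEMMAS AND PROOFS =====

-- a fold over range(len(xs)) that reads xs[k] is a fold over enumerate(xs)
theorem foldl_range_getD_enumerate {α β : Type} (f : β → Int → α → β) (d : α) :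
    ∀ (xs : List α) (s : Int) (init : β),
      (List.range xs.length).foldl (fun acc (k : Nat) => f acc (s + (k : Int)) (xs.getD k d)) init
        = (PySem.List.enumerate xs s).foldl (fun acc p => f acc p.1 p.2) init := by
  intro xs
  induction xs with
  | nil => intro s init; simp
  | cons x t ih =>
    intro s init
    rw [List.length_cons, List.range_succ_eq_map, List.foldl_cons, List.foldl_map,
        PySem.List.enumerate_cons]
    simp only [List.getD_cons_zero, List.getD_cons_succ, List.foldl_cons, Nat.cast_zero, add_zero]
    rw [← ih (s + 1) (f init s x)]
    apply PySem.List.foldl_congr_mem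
    intro acc k _
    have hc : s + ((k.succ : Nat) : Int) = s + 1 + (k : Int) := by push_cast; ring
    rw [hc]

-- inserting a run of fresh keys into a dict appends the corresponding items (A's inner loop)
theorem foldl_insert_fresh (i : Int) :
    ∀ (ps : List (Int × String)) (vv : PySem.Dict Int Int),
      (ps.map Prod.fst).Nodup →
      (∀ p ∈ ps, (i + p.1) ∉ vv.keys) →
      (ps.foldl
        (fun acc p => if p.2 ≠ "*" then acc.insert (i + p.1) ((PySem.Int.ofStr? p.2).getD 0) else acc)
        vv).items
        = vv.items ++ (ps.filterMap
            (fun p => if p.2 ≠ "*" then some (i + p.1, (PySem.Int.ofStr? p.2).getD 0) else none)) := by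
  intro ps
  induction ps with
  | nil => intro vv _ _; simp
  | cons p t ih =>
    intro vv hnd hfresh
    rw [List.map_cons, List.nodup_cons] at hnd
    obtain ⟨hp, ht⟩ := hnd
    by_cases hs : p.2 ≠ "*"
    · have hnc : vv.contains (i + p.1) = false := by
        have := hfresh p (List.mem_cons_self)
        rcases h : vv.contains (i + p.1) with _ | _
        · rfl
        · exact absurd ((PySem.Dict.contains_iff_mem_keys vv (i + p.1)).mp (by simp [h])) this
      simp only [List.foldl_cons, List.filterMap_cons, if_pos hs]
      rw [ih (vv.insert (i + p.1) ((PySem.Int.ofStr? p.2).getD 0))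
            ht
            (by
              intro q hq
              rw [PySem.Dict.keys_insert_of_not_contains vv ((PySem.Int.ofStr? p.2).getD 0) hnc]
              simp only [List.mem_append, List.mem_singleton]
              rintro (hk | hk)
              · exact hfresh q (List.mem_cons_of_mem _ hq) hk
              · have : q.1 ≠ p.1 := by
                  intro he
                  exact hp (he ▸ List.mem_map_of_mem hq)
                exact this (by omega)),
          PySem.Dict.items_insert_of_not_contains vv ((PySem.Int.ofStr? p.2).getD 0) hnc]
      simp
    · simp only [List.foldl_cons, List.filterMap_cons, if_neg hs]
      exact ih vv ht (fun q hq => hfresh q (List.mem_cons_of_mem _ hq))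

-- A's outer loop: inserting the distinct window indices appends (i, g i) in order
theorem foldl_insert_range (g : Int → List (Int × Int)) :
    ∀ (ks : List Int) (d : PySem.Dict Int (List (Int × Int))),
      ks.Nodup → (∀ k ∈ ks, k ∉ d.keys) →
      (ks.foldl (fun acc i => acc.insert i (g i)) d).items
        = d.items ++ ks.map (fun i => (i, g i)) := by
  intro ks
  induction ks with
  | nil => intro d _ _; simp
  | cons k t ih =>
    intro d hnd hfresh
    have hnc : d.contains k = false := by
      have := hfresh k (List.mem_cons_self)
      rcases h : d.contains k with _ | _
      · rfl
      · exact absurd ((PySem.Dict.contains_iff_mem_keys d k).mp (by simp [h])) this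
    simp only [List.foldl_cons, List.map_cons]
    rw [ih (d.insert k (g k)) (List.nodup_cons.mp hnd).2
          (by
            intro q hq
            rw [PySem.Dict.keys_insert_of_not_contains d (g k) hnc]
            simp only [List.mem_append, List.mem_singleton]
            rintro (hk | hk)
            · exact hfresh q (List.mem_cons_of_mem _ hq) hk
            · exact (List.nodup_cons.mp hnd).1 (hk ▸ hq)),
        PySem.Dict.items_insert_of_not_contains d (g k) hnc]
    simp

-- the inner loop of A produces the shifted non-star pair list for window i
theorem inner_eq (w : List String) (i : Int) :
    ((PySem.List.pyRange 0 ((w.length : Int)) 1).foldl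
      (fun vv j =>
        let s := PySem.List.pyGetD w j ""
        if s ≠ "*" then vv.insert (i + j) ((PySem.Int.ofStr? s).getD 0) else vv)
      (PySem.Dict.empty : PySem.Dict Int Int)).items
    = ((PySem.List.enumerate w).filterMap
        (fun p => if p.2 ≠ "*" then some (p.1, (PySem.Int.ofStr? p.2).getD 0) else none)).map
        (fun q => (i + q.1, q.2)) := by
  rw [PySem.List.pyRange_zero_natCast w.length, List.foldl_map]
  have h1 : (List.range w.length).foldl
      (fun (vv : PySem.Dict Int Int) (k : Nat) =>
        let s := PySem.List.pyGetD w (k : Int) ""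
        if s ≠ "*" then vv.insert (i + (k : Int)) ((PySem.Int.ofStr? s).getD 0) else vv)
      PySem.Dict.empty
      = (List.range w.length).foldl
        (fun vv (k : Nat) =>
          (fun (acc : PySem.Dict Int Int) (j : Int) (s : String) =>
            if s ≠ "*" then acc.insert (i + j) ((PySem.Int.ofStr? s).getD 0) else acc)
            vv ((0 : Int) + (k : Int)) (w.getD k ""))
        PySem.Dict.empty := by
    apply PySem.List.foldl_congr_mem
    intro acc k _
    rw [PySem.List.pyGetD_natCast w k ""]
    simp
  rw [h1, foldl_range_getD_enumerate
        (fun (acc : PySem.Dict Int Int) (j : Int) (s : String) =>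
          if s ≠ "*" then acc.insert (i + j) ((PySem.Int.ofStr? s).getD 0) else acc) "" w 0
        PySem.Dict.empty]
  have h2 := foldl_insert_fresh i (PySem.List.enumerate w) PySem.Dict.empty
    (by rw [show (PySem.List.enumerate w).map Prod.fst = (PySem.List.enumerate w).map (·.1) from rfl,
            PySem.List.map_fst_enumerate]
        exact PySem.List.nodup_pyRange_one 0 (0 + w.length))
    (by intro p _ h; simp at h)
  simpa [List.map_filterMap, apply_ite (Option.map (fun q : Int × Int => (i + q.1, q.2)))] using h2

-- enumerate of a mapped list
theorem enum_map {α β : Type} (g : α → β) :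
    ∀ (xs : List α) (s : Int),
      PySem.List.enumerate (xs.map g) s = (PySem.List.enumerate xs s).map (fun p => (p.1, g p.2)) := by
  intro xs
  induction xs with
  | nil => intro s; simp
  | cons x t ih =>
    intro s
    rw [List.map_cons, PySem.List.enumerate_cons, PySem.List.enumerate_cons, ih (s + 1),
        List.map_cons]

-- enumerating an already-enumerated list pairs each element with its own index
theorem enum_enum {α : Type} :
    ∀ (xs : List α) (s : Int),
      PySem.List.enumerate (PySem.List.enumerate xs s) s
        = (PySem.List.enumerate xs s).map (fun q => (q.1, q)) := by
  intro xs
  induction xs with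
  | nil => intro s; simp
  | cons x t ih =>
    intro s
    rw [PySem.List.enumerate_cons, PySem.List.enumerate_cons, ih (s + 1), List.map_cons]

-- enumerate of pyRange s (s+k) 1 starting at s pairs each index with itself
theorem enum_pyRange (k : Nat) :
    ∀ (s : Int),
      PySem.List.enumerate (PySem.List.pyRange s (s + (k : Int)) 1) s
        = (PySem.List.pyRange s (s + (k : Int)) 1).map (fun i => (i, i)) := by
  induction k with
  | zero => intro s; simp [PySem.List.pyRange_one_eq_nil]
  | succ k ih =>
    intro s
    have hc : PySem.List.pyRange s (s + ((k + 1 : Nat) : Int)) 1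
        = s :: PySem.List.pyRange (s + 1) (s + 1 + (k : Int)) 1 := by
      rw [PySem.List.pyRange_one_cons (by push_cast; omega)]
      congr 1
      congr 1
      push_cast; ring
    rw [hc, PySem.List.enumerate_cons, ih (s + 1), List.map_cons]

-- B's transposed outer loop, characterized: each bucket accumulates its shifted pair list
theorem fold_buckets :
    ∀ (ps : List (Int × String)) (bks : List (List (Int × Int))),
      (ps.foldl
        (fun bks p =>
          if p.2 ≠ "*" then
            let v := (PySem.Int.ofStr? p.2).getD 0
            (PySem.List.enumerate bks).map (fun q => q.2 ++ [(q.1 + p.1, v)])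
          else bks)
        bks)
      = (PySem.List.enumerate bks).map
          (fun q => q.2 ++ (ps.filterMap
              (fun p => if p.2 ≠ "*" then some (p.1, (PySem.Int.ofStr? p.2).getD 0) else none)).map
              (fun r => (q.1 + r.1, r.2))) := by
  intro ps
  induction ps with
  | nil =>
    intro bks
    simp only [List.foldl_nil, List.filterMap_nil, List.map_nil, List.append_nil]
    have := PySem.List.map_snd_enumerate bks 0
    simp only [this]
  | cons p t ih =>
    intro bks
    by_cases hs : p.2 ≠ "*"
    · simp only [List.foldl_cons, List.filterMap_cons, if_pos hs]
      rw [ih, enum_map, enum_enum]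
      simp [Function.comp, List.map_map]
    · simp only [List.foldl_cons, List.filterMap_cons, if_neg hs]
      exact ih bks

-- dict(b) for a bucket with distinct keys: items of the insert-fold are the bucket itself
theorem items_foldl_insert :
    ∀ (l : List (Int × Int)) (d : PySem.Dict Int Int),
      (l.map Prod.fst).Nodup →
      (∀ kv ∈ l, kv.1 ∉ d.keys) →
      (l.foldl (fun d kv => d.insert kv.1 kv.2) d).items = d.items ++ l := by
  intro l
  induction l with
  | nil => intro d _ _; simp
  | cons kv t ih =>
    intro d hnd hfresh
    rw [List.map_cons, List.nodup_cons] at hnd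
    obtain ⟨hp, ht⟩ := hnd
    have hnc : d.contains kv.1 = false := by
      have := hfresh kv (List.mem_cons_self)
      rcases h : d.contains kv.1 with _ | _
      · rfl
      · exact absurd ((PySem.Dict.contains_iff_mem_keys d kv.1).mp (by simp [h])) this
    simp only [List.foldl_cons]
    rw [ih (d.insert kv.1 kv.2) ht
          (by
            intro q hq
            rw [PySem.Dict.keys_insert_of_not_contains d kv.2 hnc]
            simp only [List.mem_append, List.mem_singleton]
            rintro (hk | hk)
            · exact hfresh q (List.mem_cons_of_mem _ hq) hk
            · exact hp (hk ▸ List.mem_map_of_mem hq)),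
        PySem.Dict.items_insert_of_not_contains d kv.2 hnc]
    simp

-- the non-star pair list has strictly increasing (hence distinct) offsets
theorem pairs_pairwise (w : List String) :
    ((PySem.List.enumerate w).filterMap
      (fun p => if p.2 ≠ "*" then some (p.1, (PySem.Int.ofStr? p.2).getD 0) else none)).Pairwise
      (fun a b => a.1 < b.1) := by
  have h := PySem.List.pairwise_lt_enumerate w 0
  refine List.Pairwise.filterMap _ ?_ h
  intro a b hab x hx y hy
  split at hx
  · split at hy
    · cases hx; cases hy; simpa using hab
    · cases hy
  · cases hx

-- ===== VERDICT (by name: the statement is the Claim_ definition above) =====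
theorem create_star_string_bad_event_dict_spec : Claim_equal_create_star_string_bad_event_dict := by
  intro n w _ _
  unfold Spec_create_star_string_bad_event_dict
  unfold create_star_string_bad_event_dict create_star_string_bad_event_dict_alt
  set m := n - (w.length : Int) + 1 with hm
  by_cases hle : m ≤ 0
  · have : PySem.List.pyRange 0 m 1 = [] := by
      rw [PySem.List.pyRange_one 0 m]
      simp [Int.toNat_of_nonpos (by omega)]
    simp only [this, List.foldl_nil, if_pos hle]
    rfl
  · rw [if_neg hle]
    -- common abbreviation
    set pairs := ((PySem.List.enumerate w).filterMap
        (fun p => if p.2 ≠ "*" then some (p.1, (PySem.Int.ofStr? p.2).getD 0) else none)) with hpairs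
    -- A's side
    rw [foldl_insert_range _ (PySem.List.pyRange 0 m 1) PySem.Dict.empty
          (PySem.List.nodup_pyRange_one 0 m) (by intro k _ h; simp at h)]
    simp only [show (PySem.Dict.empty : PySem.Dict Int (List (Int × Int))).items = [] from rfl,
      List.nil_append]
    -- B's side: evaluate the transposed fold
    have hrange : (0 : Int) + (m.toNat : Int) = m := by omega
    have henum0 : PySem.List.enumerate (PySem.List.pyRange 0 m 1) 0
        = (PySem.List.pyRange 0 m 1).map (fun i => (i, i)) := by
      have := enum_pyRange m.toNat 0
      rwa [hrange] at this
    rw [fold_buckets, enum_map, enum_enum, enum_map, henum0]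
    simp only [List.map_map, Function.comp_def]
    apply List.map_congr_left
    intro i _
    rw [inner_eq w i]
    refine congrArg (fun l => ((i : Int), l)) ?_
    -- dict(bucket i) has the bucket's items (keys distinct, strictly increasing)
    have hnd : ((([] : List (Int × Int)) ++ pairs.map (fun r => (i + r.1, r.2))).map Prod.fst).Nodup := by
      rw [List.nil_append, List.map_map]
      have h := (pairs_pairwise w).map (f := fun r : Int × Int => i + r.1)
        (by intro a b hab; exact (by omega : i + a.1 < i + b.1))
      rw [← hpairs] at h
      have : (pairs.map (Prod.fst ∘ fun r : Int × Int => (i + r.1, r.2)))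
          = pairs.map (fun r : Int × Int => i + r.1) := by
        apply List.map_congr_left; intro a _; rfl
      rw [this]
      exact List.Pairwise.imp (fun hlt => ne_of_lt hlt) h
    rw [items_foldl_insert _ PySem.Dict.empty hnd (by intro kv _ h; simp at h), hpairs]
    simp only [show (PySem.Dict.empty : PySem.Dict Int Int).items = [] from rfl, List.nil_append]
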